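-- pv_equiv track=rewrite | github.com/lamnhuthoa/intermediate-algorithms-learn | L01P01 - Dynamic Array & String/L01P02 - Exercise 3.py | get_number_limak_will_watch_the_game
-- ===== SOURCE A (Python) =====
-- def get_number_limak_will_watch_the_game(interesting_minutes: list) -> int:
--     boring_count = 0
--     total_minutes_watched = 0
--     for minute in range(1, 91):
--         if minute in interesting_minutes:
--             boring_count = 0
--         else:
--             boring_count += 1
--         total_minutes_watched += 1
--         if boring_count == 15:
--             break
--     return total_minutes_watched
-- ===== SOURCE B (Python) =====
-- def get_number_limak_will_watch_the_game(interesting_minutes: list) -> int: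
--     mins = sorted(set(m for m in interesting_minutes if 1 <= m <= 90))
--     prev = 0
--     for cur in mins:
--         if cur - prev - 1 >= 15:
--             return prev + 15
--         prev = cur
--     if 90 - prev >= 15:
--         return prev + 15
--     return 90
-- ===== Notes on version B (the rewrite author's own statement) =====
-- stated objective: faster
-- what changed: Replaces the 90-step minute-by-minute simulation (each minute doing an O(n) membership scan of the list) by building the sorted deduplicated set of in-range interesting minutes once and walking the gaps between consecutive interesting minutes in a single pass.
import Mathlib
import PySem

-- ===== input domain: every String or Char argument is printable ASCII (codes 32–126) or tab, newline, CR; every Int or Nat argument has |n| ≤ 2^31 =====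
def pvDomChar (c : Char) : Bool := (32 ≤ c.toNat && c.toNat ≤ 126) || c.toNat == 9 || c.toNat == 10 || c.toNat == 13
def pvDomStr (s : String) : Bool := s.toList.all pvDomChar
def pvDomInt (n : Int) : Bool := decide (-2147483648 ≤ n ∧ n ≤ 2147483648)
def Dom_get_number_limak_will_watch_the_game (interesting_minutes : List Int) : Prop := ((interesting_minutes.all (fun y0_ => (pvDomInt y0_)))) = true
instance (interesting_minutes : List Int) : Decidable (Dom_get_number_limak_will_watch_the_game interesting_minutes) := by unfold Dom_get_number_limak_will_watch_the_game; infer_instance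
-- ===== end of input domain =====

-- B replaces A's 90-step minute simulation by one pass over the gaps between
-- the sorted, deduplicated interesting minutes (alternative decomposition).

-- ===== PORT A =====
-- the for-loop over range(1, 91) with break, state (boring_count, total_minutes_watched)
def pvALoop (xs : List Int) : List Int → Int → Int → Int
  | [], _, total => total
  | m :: rest, boring, total =>
    let boring' := if m ∈ xs then 0 else boring + 1
    if boring' = 15 then total + 1 else pvALoop xs rest boring' (total + 1)

def get_number_limak_will_watch_the_game (interesting_minutes : List Int) : Int :=
  pvALoop interesting_minutes (PySem.List.pyRange 1 91 1) 0 0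

-- ===== PORT B =====
-- the for-loop over the sorted deduped interesting minutes, state prev
def pvBLoop : Int → List Int → Int
  | prev, [] => if 90 - prev ≥ 15 then prev + 15 else 90
  | prev, cur :: rest => if cur - prev - 1 ≥ 15 then prev + 15 else pvBLoop cur rest

def get_number_limak_will_watch_the_game_alt (interesting_minutes : List Int) : Int :=
  pvBLoop 0 (PySem.List.sorted
    (PySem.Set.ofList (interesting_minutes.filter (fun m => decide (1 ≤ m ∧ m ≤ 90))))
    (fun x => x) false)

-- ===== PRECONDITION & SPEC =====
def Spec_get_number_limak_will_watch_the_game (interesting_minutes : List Int) (out : Int) : Prop := out = get_number_limak_will_watch_the_game_alt interesting_minutes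
instance (interesting_minutes : List Int) (out : Int) : Decidable (Spec_get_number_limak_will_watch_the_game interesting_minutes out) := by unfold Spec_get_number_limak_will_watch_the_game; infer_instance

-- ===== CLAIM (what is proved, stated in full; the proofs are below) =====
def Claim_equal_get_number_limak_will_watch_the_game : Prop := ∀ (interesting_minutes : List Int), Dom_get_number_limak_will_watch_the_game interesting_minutes → Spec_get_number_limak_will_watch_the_game interesting_minutes (get_number_limak_will_watch_the_game interesting_minutes)

-- ===== LEMMAS AND PROOFS =====

-- Loop invariant: at minute m (1 ≤ m ≤ 91) with last interesting minute prev
-- (prev = 0 if none yet), boring count m-1-prev < 15, and s the sorted distinct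
-- interesting minutes still ahead, A's remaining simulation equals B's gap walk.
theorem pv_loop_eq (xs : List Int) (n : Nat) :
    ∀ (m prev : Int) (s : List Int), (91 - m).toNat = n →
    1 ≤ m → m ≤ 91 → 0 ≤ prev → prev ≤ m - 1 → m - 1 - prev ≤ 14 →
    s.Pairwise (· < ·) →
    (∀ x ∈ s, m ≤ x ∧ x ≤ 90) →
    (∀ k : Int, m ≤ k → k ≤ 90 → (k ∈ xs ↔ k ∈ s)) →
    pvALoop xs (PySem.List.pyRange m 91 1) (m - 1 - prev) (m - 1) = pvBLoop prev s := by
  induction n with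
  | zero =>
    intro m prev s hn h1 h91 hp0 hpm hb hsort hbnd hmem
    have hm : m = 91 := by omega
    subst hm
    rw [PySem.List.pyRange_one_eq_nil (by omega)]
    have hs : s = [] := by
      cases s with
      | nil => rfl
      | cons c t => exact absurd (hbnd c (by simp)) (by omega)
    subst hs
    simp only [pvALoop, pvBLoop]
    rw [if_neg (by omega)]
    norm_num
  | succ n ih =>
    intro m prev s hn h1 h91 hp0 hpm hb hsort hbnd hmem
    have hm90 : m ≤ 90 := by omega
    rw [PySem.List.pyRange_one_cons (by omega)]
    simp only [pvALoop]
    by_cases hmx : m ∈ xs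
    · -- m is interesting: it must be the head of s
      have hms : m ∈ s := (hmem m (by omega) (by omega)).mp hmx
      obtain ⟨c, t, hst⟩ : ∃ c t, s = c :: t := by
        cases s with
        | nil => simp at hms
        | cons c t => exact ⟨c, t, rfl⟩
      subst hst
      have hct : ∀ x ∈ t, c < x := (List.pairwise_cons.mp hsort).1
      have hcm : c = m := by
        rcases List.mem_cons.mp hms with h | h
        · omega
        · have := hct m h
          have := (hbnd c (by simp)).1
          omega
      subst hcm
      rw [if_pos hmx, if_neg (by omega)]
      have hrec := ih (c + 1) c t (by omega) (by omega) (by omega) (by omega) (by omega) (by omega)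
        (List.pairwise_cons.mp hsort).2
        (fun x hx => ⟨by have := hct x hx; omega, (hbnd x (List.mem_cons_of_mem _ hx)).2⟩)
        (fun k hk1 hk2 => by
          rw [hmem k (by omega) hk2, List.mem_cons]
          constructor
          · rintro (h | h)
            · omega
            · exact h
          · exact fun h => Or.inr h)
      simp only [show c + 1 - 1 = c by ring, sub_self] at hrec
      rw [show c - 1 + 1 = c by ring, hrec]
      simp only [pvBLoop]
      rw [if_neg (by omega)]
    · -- m is boring
      have hms : m ∉ s := fun h => hmx ((hmem m (by omega) (by omega)).mpr h)
      rw [if_neg hmx]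
      by_cases h15 : m - 1 - prev + 1 = 15
      · rw [if_pos h15]
        have hAval : m - 1 + 1 = prev + 15 := by omega
        rw [hAval]
        cases s with
        | nil =>
          simp only [pvBLoop]
          rw [if_pos (by omega)]
        | cons c t =>
          have hc1 : m ≤ c := (hbnd c (by simp)).1
          have hc2 : c ≠ m := fun h => hms (h ▸ List.mem_cons_self)
          simp only [pvBLoop]
          rw [if_pos (by omega)]
      · rw [if_neg h15]
        have hrec := ih (m + 1) prev s (by omega) (by omega) (by omega) (by omega) (by omega)
          (by omega) hsort
          (fun x hx => ⟨by
            have h1x := (hbnd x hx).1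
            have : x ≠ m := fun h => hms (h ▸ hx)
            omega, (hbnd x hx).2⟩)
          (fun k hk1 hk2 => hmem k (by omega) hk2)
        rw [show m - 1 - prev + 1 = m + 1 - 1 - prev by ring,
          show m - 1 + 1 = m + 1 - 1 by ring]
        exact hrec

theorem get_number_limak_will_watch_the_game_eq (xs : List Int) :
    get_number_limak_will_watch_the_game xs = get_number_limak_will_watch_the_game_alt xs := by
  unfold get_number_limak_will_watch_the_game get_number_limak_will_watch_the_game_alt
  set s := PySem.List.sorted
    (PySem.Set.ofList (xs.filter (fun m => decide (1 ≤ m ∧ m ≤ 90)))) (fun x => x) false with hs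
  have hmemf : ∀ k : Int, k ∈ s ↔ (k ∈ xs ∧ 1 ≤ k ∧ k ≤ 90) := by
    intro k
    rw [hs, PySem.List.mem_sorted, PySem.Set.mem_ofList, List.mem_filter]
    simp
  have := pv_loop_eq xs 90 1 0 s (by decide) (by decide) (by decide) (by decide) (by decide)
    (by decide)
    (by rw [hs]; exact PySem.List.sorted_ofList_pairwise_lt _)
    (fun x hx => by have := (hmemf x).mp hx; omega)
    (fun k hk1 hk2 => by rw [hmemf k]; exact ⟨fun h => ⟨h, hk1, hk2⟩, fun h => h.1⟩)
  simpa using this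

-- ===== VERDICT (by name: the statement is the Claim_ definition above) =====
theorem get_number_limak_will_watch_the_game_spec : Claim_equal_get_number_limak_will_watch_the_game := by
  intro xs _
  unfold Spec_get_number_limak_will_watch_the_game
  exact get_number_limak_will_watch_the_game_eq xs
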